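-- pv_equiv track=rewrite | github.com/BALAJIRAMESHR/TCS-Codevita-Round-2 | Extracting Challenge.py | get_next_position
-- ===== SOURCE A (Python) =====
-- def is_inside(x, y, lines):
--     """Check if a point is inside any shape using ray casting"""
--     inside = False
--     for i in range(len(lines)):
--         x1, y1, x2, y2 = lines[i]
--         if x1 == x2:  # Vertical line
--             if x1 > x and min(y1, y2) <= y <= max(y1, y2):
--                 inside = not inside
--     return inside
--
-- def is_on_line(x, y, lines):
--     """Check if a point lies on any line"""
--     for x1, y1, x2, y2 in lines:
--         if x1 == x2:  # Vertical line
--             if x == x1 and min(y1, y2) <= y <= max(y1, y2):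
--                 return True
--         else:  # Horizontal line
--             if y == y1 and min(x1, x2) <= x <= max(x1, x2):
--                 return True
--     return False
--
-- def get_area(x, y, S, lines, R, C):
--     """Calculate area covered by placing block at (x,y)"""
--     if x < 0 or y < 0 or x + S > C or y + S > R:
--         return 0
--
--     area = 0
--     for i in range(y, min(y + S, R)):
--         for j in range(x, min(x + S, C)):
--             if is_on_line(j, i, lines) or is_inside(j, i, lines):
--                 area += 1
--     return area
--
-- def get_next_position(covered, S, lines, R, C):
--     """Find next optimal position for block placement"""
--     max_area = 0
--     best_pos = None
--
--     # Try all possible positions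
--     for y in range(R - S + 1):
--         for x in range(C - S + 1):
--             # Skip if position overlaps with previous placements
--             if any(px <= x < px + S and py <= y < py + S for px, py in covered):
--                 continue
--
--             area = get_area(x, y, S, lines, R, C)
--
--             # Update best position based on area and tiebreaker rules
--             if area > max_area:
--                 max_area = area
--                 best_pos = (x, y)
--             elif area == max_area and area > 0:
--                 # For equal area, prefer lower position (closer to bottom)
--                 if (
--                     best_pos is None
--                     or y < best_pos[1]
--                     or (y == best_pos[1] and x < best_pos[0])
--                 ):
--                     best_pos = (x, y)
--
--     return best_pos, max_area
-- ===== SOURCE B (Python) =====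
-- def _cell_covered(j, i, lines):
--     on = any(
--         (j == x1 and min(y1, y2) <= i <= max(y1, y2)) if x1 == x2
--         else (i == y1 and min(x1, x2) <= j <= max(x1, x2))
--         for x1, y1, x2, y2 in lines
--     )
--     crossings = sum(
--         1 for x1, y1, x2, y2 in lines
--         if x1 == x2 and x1 > j and min(y1, y2) <= i <= max(y1, y2)
--     )
--     return on or crossings % 2 == 1
--
--
-- def get_next_position(covered, S, lines, R, C):
--     if S <= 0:
--         return None, 0  # a degenerate block covers nothing
--     # candidate placements in row-major order, overlaps with `covered` dropped
--     positions = [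
--         (x, y)
--         for y in range(R - S + 1)
--         for x in range(C - S + 1)
--         if not any(px <= x < px + S and py <= y < py + S for px, py in covered)
--     ]
--     if not positions:
--         return None, 0
--     # membership grid computed once: no per-cell scan over lines inside the search
--     grid = [[_cell_covered(j, i, lines) for j in range(C)] for i in range(R)]
--     best_pos, max_area = None, 0
--     for x, y in positions:
--         area = sum(
--             sum(1 for j in range(x, min(x + S, C)) if grid[i][j])
--             for i in range(y, min(y + S, R))
--         )
--         if area > max_area:
--             best_pos, max_area = (x, y), area
--     return best_pos, max_area
-- ===== Notes on version B (the rewrite author's own statement) =====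
-- stated objective: alternative
-- what changed: B first materialises the candidate-position list (overlaps filtered out), returns early when it is empty, precomputes a cell-membership grid once (counting ray crossings arithmetically instead of A's parity toggle) so the per-cell scan over lines is not repeated inside each area query, and replaces A's tiebreak update chain by a plain first-maximum scan (A's equal-area branch is provably unreachable).
import Mathlib
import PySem

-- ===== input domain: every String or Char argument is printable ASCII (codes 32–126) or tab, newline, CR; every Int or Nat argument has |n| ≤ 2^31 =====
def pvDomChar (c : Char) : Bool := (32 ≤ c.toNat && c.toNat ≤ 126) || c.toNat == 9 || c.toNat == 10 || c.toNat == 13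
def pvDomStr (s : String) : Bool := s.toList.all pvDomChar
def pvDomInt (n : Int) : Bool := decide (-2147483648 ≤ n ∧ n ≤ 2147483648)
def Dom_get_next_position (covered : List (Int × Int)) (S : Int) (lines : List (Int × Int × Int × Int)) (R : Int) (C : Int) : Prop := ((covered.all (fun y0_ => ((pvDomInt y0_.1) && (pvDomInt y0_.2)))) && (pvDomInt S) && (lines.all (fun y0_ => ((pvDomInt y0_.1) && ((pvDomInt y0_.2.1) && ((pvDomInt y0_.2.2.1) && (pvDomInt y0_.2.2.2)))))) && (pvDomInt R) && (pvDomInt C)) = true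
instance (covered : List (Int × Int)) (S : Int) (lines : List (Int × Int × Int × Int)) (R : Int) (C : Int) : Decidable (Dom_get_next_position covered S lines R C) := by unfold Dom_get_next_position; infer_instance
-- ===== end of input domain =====

-- B precomputes a cell-membership grid once (crossings counted arithmetically), so the
-- per-cell scan over `lines` disappears from each area query, and drops A's unreachable
-- equal-area tiebreak branch in favour of a plain first-maximum row-major scan.

-- ===== PORT A =====
def pyIsInside (x y : Int) (lines : List (Int × Int × Int × Int)) : Bool :=
  lines.foldl (fun inside l =>
    if l.1 = l.2.2.1 then
      if l.1 > x ∧ min l.2.1 l.2.2.2 ≤ y ∧ y ≤ max l.2.1 l.2.2.2 then !inside else inside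
    else inside) false

def pyIsOnLine (x y : Int) : List (Int × Int × Int × Int) → Bool
  | [] => false
  | l :: rest =>
    if l.1 = l.2.2.1 then
      if x = l.1 ∧ min l.2.1 l.2.2.2 ≤ y ∧ y ≤ max l.2.1 l.2.2.2 then true
      else pyIsOnLine x y rest
    else
      if y = l.2.1 ∧ min l.1 l.2.2.1 ≤ x ∧ x ≤ max l.1 l.2.2.1 then true
      else pyIsOnLine x y rest

def pyGetArea (x y S : Int) (lines : List (Int × Int × Int × Int)) (R C : Int) : Int :=
  if x < 0 ∨ y < 0 ∨ x + S > C ∨ y + S > R then 0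
  else
    (PySem.List.pyRange y (min (y + S) R) 1).foldl (fun area i =>
      (PySem.List.pyRange x (min (x + S) C) 1).foldl (fun area j =>
        if pyIsOnLine j i lines || pyIsInside j i lines then area + 1 else area) area) 0

-- body of A's inner `for x in range(C - S + 1)` loop
def pyStepA (covered : List (Int × Int)) (S : Int) (lines : List (Int × Int × Int × Int))
    (R C y : Int) (st : Option (Int × Int) × Int) (x : Int) : Option (Int × Int) × Int :=
  if covered.any (fun p => decide (p.1 ≤ x ∧ x < p.1 + S ∧ p.2 ≤ y ∧ y < p.2 + S)) then st
  else
    let area := pyGetArea x y S lines R C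
    if area > st.2 then (some (x, y), area)
    else if area = st.2 ∧ area > 0 then
      match st.1 with
      | none => (some (x, y), st.2)
      | some b =>
        if y < b.2 ∨ (y = b.2 ∧ x < b.1) then (some (x, y), st.2) else st
    else st

def get_next_position (covered : List (Int × Int)) (S : Int) (lines : List (Int × Int × Int × Int)) (R : Int) (C : Int) : (Option (Int × Int)) × Int :=
  (PySem.List.pyRange 0 (R - S + 1) 1).foldl (fun st y =>
    (PySem.List.pyRange 0 (C - S + 1) 1).foldl (pyStepA covered S lines R C y) st)
    ((none : Option (Int × Int)), (0 : Int))

-- ===== PORT B =====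
def cellCovered (j i : Int) (lines : List (Int × Int × Int × Int)) : Bool :=
  let on := lines.any (fun l =>
    if l.1 = l.2.2.1 then decide (j = l.1 ∧ min l.2.1 l.2.2.2 ≤ i ∧ i ≤ max l.2.1 l.2.2.2)
    else decide (i = l.2.1 ∧ min l.1 l.2.2.1 ≤ j ∧ j ≤ max l.1 l.2.2.1))
  let crossings : Int := lines.foldl (fun c l =>
    if l.1 = l.2.2.1 ∧ l.1 > j ∧ min l.2.1 l.2.2.2 ≤ i ∧ i ≤ max l.2.1 l.2.2.2 then c + 1
    else c) 0
  on || decide (crossings % 2 = 1)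

def buildGrid (lines : List (Int × Int × Int × Int)) (R C : Int) : List (List Bool) :=
  (PySem.List.pyRange 0 R 1).map (fun i =>
    (PySem.List.pyRange 0 C 1).map (fun j => cellCovered j i lines))

-- grid[i][j] is read with pyGetD; the search keeps i, j in range, where this is exact
def gridArea (grid : List (List Bool)) (x y S R C : Int) : Int :=
  (PySem.List.pyRange y (min (y + S) R) 1).foldl (fun a i =>
    a + (PySem.List.pyRange x (min (x + S) C) 1).foldl (fun a2 j =>
      if PySem.List.pyGetD (PySem.List.pyGetD grid i []) j false then a2 + 1 else a2) 0) 0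

-- body of B's placement loop (`for x, y in positions`)
def pyStepB (S : Int) (grid : List (List Bool)) (R C : Int)
    (st : Option (Int × Int) × Int) (p : Int × Int) : Option (Int × Int) × Int :=
  let area := gridArea grid p.1 p.2 S R C
  if area > st.2 then (some (p.1, p.2), area) else st

-- the comprehension's `if not any(...)` condition
def keepF (covered : List (Int × Int)) (S y x : Int) : Bool :=
  !(covered.any (fun p => decide (p.1 ≤ x ∧ x < p.1 + S ∧ p.2 ≤ y ∧ y < p.2 + S)))

-- the `positions` comprehension
def candPositions (covered : List (Int × Int)) (S R C : Int) : List (Int × Int) :=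
  (PySem.List.pyRange 0 (R - S + 1) 1).flatMap (fun y =>
    ((PySem.List.pyRange 0 (C - S + 1) 1).filter (keepF covered S y)).map (fun x => (x, y)))

def get_next_position_alt (covered : List (Int × Int)) (S : Int) (lines : List (Int × Int × Int × Int)) (R : Int) (C : Int) : (Option (Int × Int)) × Int :=
  if S ≤ 0 then (none, 0)  -- a degenerate block covers nothing
  else
  let positions := candPositions covered S R C
  if positions = [] then (none, 0)
  else
    let grid := buildGrid lines R C
    positions.foldl (pyStepB S grid R C) ((none : Option (Int × Int)), (0 : Int))

-- ===== PRECONDITION & SPEC =====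
def Spec_get_next_position (covered : List (Int × Int)) (S : Int) (lines : List (Int × Int × Int × Int)) (R : Int) (C : Int) (out : (Option (Int × Int)) × Int) : Prop := out = get_next_position_alt covered S lines R C
instance (covered : List (Int × Int)) (S : Int) (lines : List (Int × Int × Int × Int)) (R : Int) (C : Int) (out : (Option (Int × Int)) × Int) : Decidable (Spec_get_next_position covered S lines R C out) := by unfold Spec_get_next_position; infer_instance

-- ===== CLAIM (what is proved, stated in full; the proofs are below) =====
def Claim_equal_get_next_position : Prop := ∀ (covered : List (Int × Int)) (S : Int) (lines : List (Int × Int × Int × Int)) (R : Int) (C : Int), Dom_get_next_position covered S lines R C → Spec_get_next_position covered S lines R C (get_next_position covered S lines R C)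

-- ===== LEMMAS AND PROOFS =====

-- named copies of the inline loop bodies (proof-side abbreviations, defeq to the lambdas)
def onF (j i : Int) (l : Int × Int × Int × Int) : Bool :=
  if l.1 = l.2.2.1 then decide (j = l.1 ∧ min l.2.1 l.2.2.2 ≤ i ∧ i ≤ max l.2.1 l.2.2.2)
  else decide (i = l.2.1 ∧ min l.1 l.2.2.1 ≤ j ∧ j ≤ max l.1 l.2.2.1)

def crossF (j i : Int) (c : Int) (l : Int × Int × Int × Int) : Int :=
  if l.1 = l.2.2.1 ∧ l.1 > j ∧ min l.2.1 l.2.2.2 ≤ i ∧ i ≤ max l.2.1 l.2.2.2 then c + 1 else c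

def togF (j i : Int) (inside : Bool) (l : Int × Int × Int × Int) : Bool :=
  if l.1 = l.2.2.1 then
    if l.1 > j ∧ min l.2.1 l.2.2.2 ≤ i ∧ i ≤ max l.2.1 l.2.2.2 then !inside else inside
  else inside

-- B's `any` over lines computes A's early-return on-line loop
theorem onLine_eq (j i : Int) (lines : List (Int × Int × Int × Int)) :
    lines.any (onF j i) = pyIsOnLine j i lines := by
  induction lines with
  | nil => rfl
  | cons l rest ih =>
    rw [List.any_cons, ih]
    simp only [pyIsOnLine]
    by_cases hx : l.1 = l.2.2.1
    · by_cases hp : j = l.1 ∧ min l.2.1 l.2.2.2 ≤ i ∧ i ≤ max l.2.1 l.2.2.2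
      · rw [show onF j i l = true from by unfold onF; rw [if_pos hx, decide_eq_true hp],
            if_pos hx, if_pos hp, Bool.true_or]
      · rw [show onF j i l = false from by unfold onF; rw [if_pos hx, decide_eq_false hp],
            if_pos hx, if_neg hp, Bool.false_or]
    · by_cases hp : i = l.2.1 ∧ min l.1 l.2.2.1 ≤ j ∧ j ≤ max l.1 l.2.2.1
      · rw [show onF j i l = true from by unfold onF; rw [if_neg hx, decide_eq_true hp],
            if_neg hx, if_pos hp, Bool.true_or]
      · rw [show onF j i l = false from by unfold onF; rw [if_neg hx, decide_eq_false hp],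
            if_neg hx, if_neg hp, Bool.false_or]

-- the crossing count started at c is c plus the count started at 0
theorem cross_from (j i : Int) (lines : List (Int × Int × Int × Int)) : ∀ (c : Int),
    lines.foldl (crossF j i) c = c + lines.foldl (crossF j i) 0 := by
  induction lines with
  | nil => intro c; simp
  | cons l rest ih =>
    intro c
    rw [List.foldl_cons, List.foldl_cons]
    by_cases hp : l.1 = l.2.2.1 ∧ l.1 > j ∧ min l.2.1 l.2.2.2 ≤ i ∧ i ≤ max l.2.1 l.2.2.2
    · rw [show crossF j i c l = c + 1 from by unfold crossF; rw [if_pos hp],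
          show crossF j i 0 l = 1 from by unfold crossF; rw [if_pos hp]; ring,
          ih (c + 1), ih 1]
      ring
    · rw [show crossF j i c l = c from by unfold crossF; rw [if_neg hp],
          show crossF j i 0 l = 0 from by unfold crossF; rw [if_neg hp]]
      exact ih c

-- A's parity toggle is B's crossings-count parity
theorem inside_parity (j i : Int) (lines : List (Int × Int × Int × Int)) : ∀ (b : Bool),
    lines.foldl (togF j i) b
      = (if (lines.foldl (crossF j i) 0) % 2 = 1 then !b else b) := by
  induction lines with
  | nil => intro b; simp
  | cons l rest ih =>
    intro b
    rw [List.foldl_cons, List.foldl_cons]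
    by_cases hp : l.1 = l.2.2.1 ∧ l.1 > j ∧ min l.2.1 l.2.2.2 ≤ i ∧ i ≤ max l.2.1 l.2.2.2
    · rw [show togF j i b l = !b from by unfold togF; rw [if_pos hp.1, if_pos hp.2],
          show crossF j i 0 l = 1 from by unfold crossF; rw [if_pos hp]; ring,
          ih (!b), cross_from j i rest 1]
      by_cases h2 : (rest.foldl (crossF j i) 0) % 2 = 1
      · rw [if_pos h2, if_neg (by omega), Bool.not_not]
      · rw [if_neg h2, if_pos (by omega)]
    · rw [show togF j i b l = b from by
            unfold togF
            by_cases hx : l.1 = l.2.2.1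
            · rw [if_pos hx, if_neg (fun h => hp ⟨hx, h⟩)]
            · rw [if_neg hx],
          show crossF j i 0 l = 0 from by unfold crossF; rw [if_neg hp]]
      exact ih b

-- the grid cell predicate is A's per-cell test
theorem cell_eq (j i : Int) (lines : List (Int × Int × Int × Int)) :
    cellCovered j i lines = (pyIsOnLine j i lines || pyIsInside j i lines) := by
  show (lines.any (onF j i) || decide ((lines.foldl (crossF j i) 0) % 2 = 1))
      = (pyIsOnLine j i lines || lines.foldl (togF j i) false)
  rw [onLine_eq, inside_parity j i lines false]
  by_cases h2 : (lines.foldl (crossF j i) 0) % 2 = 1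
  · rw [decide_eq_true h2, if_pos h2, Bool.not_false]
  · rw [decide_eq_false h2, if_neg h2]

-- reading the precomputed grid in range gives the cell predicate
theorem grid_get (lines : List (Int × Int × Int × Int)) (R C i j : Int)
    (h0 : 0 ≤ i) (h1 : i < R) (h2 : 0 ≤ j) (h3 : j < C) :
    PySem.List.pyGetD (PySem.List.pyGetD (buildGrid lines R C) i []) j false
      = cellCovered j i lines := by
  unfold buildGrid
  rw [PySem.List.pyGetD_map_pyRange_of_nonneg _ _ _ _ h0 h1,
      PySem.List.pyGetD_map_pyRange_of_nonneg _ _ _ _ h2 h3]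

-- an if-count foldl started at a is a plus the count started at 0
theorem countIf_from (p : Int → Bool) (l : List Int) : ∀ (a : Int),
    l.foldl (fun acc j => if p j then acc + 1 else acc) a
    = a + l.foldl (fun acc j => if p j then acc + 1 else acc) 0 := by
  induction l with
  | nil => intro a; simp
  | cons u l ih =>
    intro a
    simp only [List.foldl_cons]
    by_cases hp : p u = true
    · rw [if_pos hp, if_pos hp, ih (a + 1), ih (0 + 1)]; ring
    · rw [if_neg hp, if_neg hp]; exact ih a

-- in-bounds placements: A's rescan area equals B's grid area
theorem area_eq (lines : List (Int × Int × Int × Int)) (R C S x y : Int)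
    (hx0 : 0 ≤ x) (hxC : x + S ≤ C) (hy0 : 0 ≤ y) (hyR : y + S ≤ R) :
    pyGetArea x y S lines R C = gridArea (buildGrid lines R C) x y S R C := by
  unfold pyGetArea gridArea
  rw [if_neg (by omega)]
  apply PySem.List.foldl_congr_mem
  intro acc i hi
  have hi' := (PySem.List.mem_pyRange_one).1 hi
  have h0i : 0 ≤ i := le_trans hy0 hi'.1
  have hiR : i < R := lt_of_lt_of_le hi'.2 (min_le_right _ _)
  have hinner :
      (PySem.List.pyRange x (min (x + S) C) 1).foldl (fun a2 j =>
        if PySem.List.pyGetD (PySem.List.pyGetD (buildGrid lines R C) i []) j false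
        then a2 + 1 else a2) (0 : Int)
      = (PySem.List.pyRange x (min (x + S) C) 1).foldl (fun a2 j =>
        if pyIsOnLine j i lines || pyIsInside j i lines then a2 + 1 else a2) (0 : Int) := by
    apply PySem.List.foldl_congr_mem
    intro a2 u hu
    have hu' := (PySem.List.mem_pyRange_one).1 hu
    rw [grid_get lines R C i u h0i hiR (le_trans hx0 hu'.1)
        (lt_of_lt_of_le hu'.2 (min_le_right _ _)), cell_eq]
  rw [countIf_from (fun j => pyIsOnLine j i lines || pyIsInside j i lines)
      (PySem.List.pyRange x (min (x + S) C) 1) acc, hinner]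

-- A's unskipped placement step (pyStepA with the overlap test peeled off)
def stepA2 (S : Int) (lines : List (Int × Int × Int × Int)) (R C y : Int)
    (st : Option (Int × Int) × Int) (x : Int) : Option (Int × Int) × Int :=
  let area := pyGetArea x y S lines R C
  if area > st.2 then (some (x, y), area)
  else if area = st.2 ∧ area > 0 then
    match st.1 with
    | none => (some (x, y), st.2)
    | some b =>
      if y < b.2 ∨ (y = b.2 ∧ x < b.1) then (some (x, y), st.2) else st
  else st

-- A's row loop with its skip equals the stepA2 fold over the kept columns
theorem filter_fold_A (covered : List (Int × Int)) (S : Int)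
    (lines : List (Int × Int × Int × Int)) (R C y : Int) :
    ∀ (xs : List Int) (st : Option (Int × Int) × Int),
    xs.foldl (pyStepA covered S lines R C y) st
      = (xs.filter (keepF covered S y)).foldl (stepA2 S lines R C y) st := by
  intro xs
  induction xs with
  | nil => intro st; rfl
  | cons u xs ih =>
    intro st
    rw [List.foldl_cons]
    by_cases hk : keepF covered S y u = true
    · rw [List.filter_cons_of_pos hk, List.foldl_cons]
      have : pyStepA covered S lines R C y st u = stepA2 S lines R C y st u := by
        unfold pyStepA stepA2 keepF at *
        rw [if_neg (by simpa using hk)]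
      rw [this, ih]
    · rw [List.filter_cons_of_neg hk]
      have : pyStepA covered S lines R C y st u = st := by
        unfold pyStepA keepF at *
        rw [if_pos (by simpa using hk)]
      rw [this, ih]

-- a foldl over a flatMap is the nested foldl
theorem foldl_flatMap {α β γ : Type} (l : List α) (f : α → List β)
    (g : γ → β → γ) : ∀ (init : γ),
    (l.flatMap f).foldl g init = l.foldl (fun acc a => (f a).foldl g acc) init := by
  induction l with
  | nil => intro init; rfl
  | cons a l ih =>
    intro init
    rw [List.flatMap_cons, List.foldl_append, List.foldl_cons, ih]

-- one row of the search: A's fold (with its dead tiebreak branch) equals B's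
theorem row_eq (S : Int) (lines : List (Int × Int × Int × Int))
    (R C y : Int) (hy0 : 0 ≤ y) (hyR : y ≤ R - S) :
    ∀ (xs : List Int), xs.Pairwise (· < ·) → (∀ u ∈ xs, 0 ≤ u ∧ u ≤ C - S) →
    ∀ (st : Option (Int × Int) × Int),
    (st.1 = none → st.2 = 0) →
    (∀ bx by', st.1 = some (bx, by') → by' < y ∨ (by' = y ∧ ∀ u ∈ xs, bx < u)) →
    xs.foldl (stepA2 S lines R C y) st
      = xs.foldl (fun st x => pyStepB S (buildGrid lines R C) R C st (x, y)) st
    ∧ ((xs.foldl (fun st x => pyStepB S (buildGrid lines R C) R C st (x, y)) st).1 = none →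
        (xs.foldl (fun st x => pyStepB S (buildGrid lines R C) R C st (x, y)) st).2 = 0)
    ∧ (∀ bx by', (xs.foldl (fun st x => pyStepB S (buildGrid lines R C) R C st (x, y)) st).1
        = some (bx, by') → by' ≤ y) := by
  intro xs
  induction xs with
  | nil =>
    intro _ _ st h1 h2
    refine ⟨rfl, h1, fun bx by' h => ?_⟩
    rcases h2 bx by' h with h' | h'
    · omega
    · exact le_of_eq h'.1
  | cons u xs ih =>
    intro hpw hbnd st h1 h2
    have hub := hbnd u List.mem_cons_self
    have harea := area_eq lines R C S u y hub.1 (by omega) hy0 (by omega)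
    have hstep : stepA2 S lines R C y st u
        = pyStepB S (buildGrid lines R C) R C st (u, y) := by
      unfold stepA2 pyStepB
      dsimp only
      rw [harea]
      by_cases hgt : gridArea (buildGrid lines R C) u y S R C > st.2
      · rw [if_pos hgt, if_pos hgt]
      · rw [if_neg hgt, if_neg hgt]
        by_cases hc : gridArea (buildGrid lines R C) u y S R C = st.2 ∧
            gridArea (buildGrid lines R C) u y S R C > 0
        · rw [if_pos hc]
          cases hst : st.1 with
          | none => exact absurd hc (by have := h1 hst; omega)
          | some b =>
            show (if y < b.2 ∨ (y = b.2 ∧ u < b.1) then (some (u, y), st.2) else st) = st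
            rw [if_neg ?hno]
            case hno =>
              rcases h2 b.1 b.2 (by rw [hst]) with h' | h'
              · omega
              · have := h'.2 u List.mem_cons_self
                omega
        · rw [if_neg hc]
    have hinv1 : (pyStepB S (buildGrid lines R C) R C st (u, y)).1 = none →
        (pyStepB S (buildGrid lines R C) R C st (u, y)).2 = 0 := by
      unfold pyStepB
      dsimp only
      by_cases hgt : gridArea (buildGrid lines R C) u y S R C > st.2
      · rw [if_pos hgt]; intro h; simp at h
      · rw [if_neg hgt]; exact h1
    have hinv2 : ∀ bx by', (pyStepB S (buildGrid lines R C) R C st (u, y)).1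
        = some (bx, by') → by' < y ∨ (by' = y ∧ ∀ v ∈ xs, bx < v) := by
      intro bx by'
      unfold pyStepB
      dsimp only
      by_cases hgt : gridArea (buildGrid lines R C) u y S R C > st.2
      · rw [if_pos hgt]
        intro h
        simp at h
        refine Or.inr ⟨h.2.symm, fun v hv => ?_⟩
        rw [← h.1]
        exact List.rel_of_pairwise_cons hpw hv
      · rw [if_neg hgt]
        intro h
        rcases h2 bx by' h with h' | h'
        · exact Or.inl h'
        · exact Or.inr ⟨h'.1, fun v hv => h'.2 v (List.mem_cons_of_mem _ hv)⟩
    have hrest := ih (List.Pairwise.of_cons hpw)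
      (fun v hv => hbnd v (List.mem_cons_of_mem _ hv))
      (pyStepB S (buildGrid lines R C) R C st (u, y)) hinv1 hinv2
    rw [List.foldl_cons, List.foldl_cons, hstep]
    exact hrest

-- the full search: fold A's rows = fold B's rows
theorem rows_eq (covered : List (Int × Int)) (S : Int) (lines : List (Int × Int × Int × Int))
    (R C : Int) :
    ∀ (ys : List Int), ys.Pairwise (· < ·) → (∀ v ∈ ys, 0 ≤ v ∧ v ≤ R - S) →
    ∀ (st : Option (Int × Int) × Int),
    (st.1 = none → st.2 = 0) →
    (∀ bx by', st.1 = some (bx, by') → ∀ v ∈ ys, by' < v) →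
    ys.foldl (fun st y =>
        ((PySem.List.pyRange 0 (C - S + 1) 1).filter (keepF covered S y)).foldl
          (stepA2 S lines R C y) st) st
    = ys.foldl (fun st y =>
        ((PySem.List.pyRange 0 (C - S + 1) 1).filter (keepF covered S y)).foldl
          (fun st x => pyStepB S (buildGrid lines R C) R C st (x, y)) st) st := by
  intro ys
  induction ys with
  | nil => intro _ _ st _ _; rfl
  | cons y ys ih =>
    intro hpw hbnd st h1 h2
    have hyb := hbnd y List.mem_cons_self
    have hrow := row_eq S lines R C y hyb.1 hyb.2
      ((PySem.List.pyRange 0 (C - S + 1) 1).filter (keepF covered S y))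
      ((PySem.List.pairwise_lt_pyRange_one 0 (C - S + 1)).filter _)
      (fun u hu => by
        have := (PySem.List.mem_pyRange_one).1 (List.mem_of_mem_filter hu)
        omega) st h1
      (fun bx by' h => Or.inl (h2 bx by' h y List.mem_cons_self))
    rw [List.foldl_cons, List.foldl_cons, hrow.1]
    exact ih (List.Pairwise.of_cons hpw)
      (fun v hv => hbnd v (List.mem_cons_of_mem _ hv)) _ hrow.2.1
      (fun bx by' h v hv => by
        have ha := hrow.2.2 bx by' h
        have hb := List.rel_of_pairwise_cons hpw hv
        omega)

-- a fold whose body ignores its element is the identity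
theorem foldl_id_of_const {α β : Type} (ys : List β) (st : α) :
    ys.foldl (fun st (_ : β) => st) st = st := by
  induction ys generalizing st with
  | nil => rfl
  | cons y ys ih => exact ih st

-- a fold from a fixed point of its body stays there
theorem foldl_fixed_point {α β : Type} (f : α → β → α) (a : α)
    (h : ∀ x, f a x = a) : ∀ (xs : List β), xs.foldl f a = a := by
  intro xs
  induction xs with
  | nil => rfl
  | cons x xs ih => rw [List.foldl_cons, h x, ih]

-- with a nonpositive block size A's area is always zero
theorem area_zero_of_S_nonpos (x y S : Int) (lines : List (Int × Int × Int × Int))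
    (R C : Int) (hS : S ≤ 0) : pyGetArea x y S lines R C = 0 := by
  unfold pyGetArea
  by_cases hg : x < 0 ∨ y < 0 ∨ x + S > C ∨ y + S > R
  · rw [if_pos hg]
  · rw [if_neg hg, PySem.List.pyRange_one_eq_nil (by omega)]
    exact foldl_fixed_point _ _ (fun i => rfl) _

-- with a nonpositive block size A's step keeps the initial state
theorem stepA_id_of_S_nonpos (covered : List (Int × Int)) (S : Int)
    (lines : List (Int × Int × Int × Int)) (R C y x : Int) (hS : S ≤ 0) :
    pyStepA covered S lines R C y ((none : Option (Int × Int)), (0 : Int)) x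
      = ((none : Option (Int × Int)), (0 : Int)) := by
  unfold pyStepA
  rw [area_zero_of_S_nonpos x y S lines R C hS]
  by_cases hskip : (covered.any fun p =>
      decide (p.1 ≤ x ∧ x < p.1 + S ∧ p.2 ≤ y ∧ y < p.2 + S)) = true
  · rw [if_pos hskip]
  · rw [if_neg hskip, if_neg (by omega), if_neg (by omega)]

-- ===== VERDICT (by name: the statement is the Claim_ definition above) =====
theorem get_next_position_spec : Claim_equal_get_next_position := by
  intro covered S lines R C _
  unfold Spec_get_next_position get_next_position get_next_position_alt candPositions
  by_cases hS : S ≤ 0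
  · rw [if_pos hS]
    exact foldl_fixed_point _ _ (fun y =>
      foldl_fixed_point _ _ (fun x => stepA_id_of_S_nonpos covered S lines R C y x hS) _) _
  rw [if_neg hS]
  have hA : (PySem.List.pyRange 0 (R - S + 1) 1).foldl (fun st y =>
      (PySem.List.pyRange 0 (C - S + 1) 1).foldl (pyStepA covered S lines R C y) st)
      ((none : Option (Int × Int)), (0 : Int))
      = (PySem.List.pyRange 0 (R - S + 1) 1).foldl (fun st y =>
      ((PySem.List.pyRange 0 (C - S + 1) 1).filter (keepF covered S y)).foldl
        (stepA2 S lines R C y) st) ((none : Option (Int × Int)), (0 : Int)) :=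
    PySem.List.foldl_congr_mem _ _ _ _ (fun st y _ =>
      filter_fold_A covered S lines R C y (PySem.List.pyRange 0 (C - S + 1) 1) st)
  rw [hA]
  by_cases hnil : (PySem.List.pyRange 0 (R - S + 1) 1).flatMap (fun y =>
      ((PySem.List.pyRange 0 (C - S + 1) 1).filter (keepF covered S y)).map
        (fun x => (x, y))) = []
  · rw [if_pos hnil]
    have hrow0 : ∀ y ∈ PySem.List.pyRange 0 (R - S + 1) 1,
        (PySem.List.pyRange 0 (C - S + 1) 1).filter (keepF covered S y) = [] := by
      intro y hy
      have := List.flatMap_eq_nil_iff.1 hnil _ hy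
      exact List.map_eq_nil_iff.1 this
    have : ∀ (st : Option (Int × Int) × Int),
        (PySem.List.pyRange 0 (R - S + 1) 1).foldl (fun st y =>
          ((PySem.List.pyRange 0 (C - S + 1) 1).filter (keepF covered S y)).foldl
            (stepA2 S lines R C y) st) st = st := by
      intro st
      rw [PySem.List.foldl_congr_mem _ _ (fun st (_ : Int) => st) st
        (fun st y hy => by rw [hrow0 y hy]; rfl)]
      exact foldl_id_of_const _ st
    exact this _
  · rw [if_neg hnil, foldl_flatMap]
    have hB : ∀ y (st : Option (Int × Int) × Int),
        (((PySem.List.pyRange 0 (C - S + 1) 1).filter (keepF covered S y)).map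
          (fun x => (x, y))).foldl (pyStepB S (buildGrid lines R C) R C) st
        = ((PySem.List.pyRange 0 (C - S + 1) 1).filter (keepF covered S y)).foldl
          (fun st x => pyStepB S (buildGrid lines R C) R C st (x, y)) st := by
      intro y st
      rw [List.foldl_map]
    rw [PySem.List.foldl_congr_mem _ _ _ ((none : Option (Int × Int)), (0 : Int))
      (fun st y _ => hB y st)]
    exact rows_eq covered S lines R C (PySem.List.pyRange 0 (R - S + 1) 1)
      (PySem.List.pairwise_lt_pyRange_one 0 (R - S + 1))
      (fun v hv => by
        have := (PySem.List.mem_pyRange_one).1 hv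
        omega)
      (none, 0) (fun _ => rfl) (fun bx by' h => by simp at h)
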